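-- pv_equiv track=rewrite | github.com/eridangs/Bee_crowd_ex | 1534.py | gera
-- ===== SOURCE A (Python) =====
-- def gera(n):
--     m = [[3]*n for _ in range(n)]
--     a = n
--     meio = n//2
--
-- # diagonais
--
--
--     for i in range(n):
--         m[i][i] = 1
--
--     for i in range(a):
--         m[a-1][i] = 2
--         a -= 1
-- # diagonais
--
--     return m
-- ===== SOURCE B (Python) =====
-- def gera(n):
--     # Build only the top half by concatenating runs of 3s with the two marks,
--     # then obtain the bottom half by symmetry: row n-1-i is row i reversed.
--     top = []
--     for i in range((n + 1) // 2):
--         j = n - 1 - i  # anti-diagonal column; j >= i in the top half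
--         if i == j:
--             top.append([3] * i + [2] + [3] * i)
--         else:
--             top.append([3] * i + [1] + [3] * (j - i - 1) + [2] + [3] * i)
--     bottom = [row[::-1] for row in top[:n // 2]]
--     bottom.reverse()
--     return top + bottom
-- ===== Notes on version B (the rewrite author's own statement) =====
-- stated objective: alternative
-- what changed: B constructs only the top half of the matrix, building each row by concatenating runs of 3s around the two marks (with the anti-diagonal mark winning the odd-n center), then produces the whole bottom half by mirror symmetry (each bottom row is the reversal of its mirror top row), instead of A's fill-everything-with-3 followed by two full overwriting diagonal passes.
import Mathlib
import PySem

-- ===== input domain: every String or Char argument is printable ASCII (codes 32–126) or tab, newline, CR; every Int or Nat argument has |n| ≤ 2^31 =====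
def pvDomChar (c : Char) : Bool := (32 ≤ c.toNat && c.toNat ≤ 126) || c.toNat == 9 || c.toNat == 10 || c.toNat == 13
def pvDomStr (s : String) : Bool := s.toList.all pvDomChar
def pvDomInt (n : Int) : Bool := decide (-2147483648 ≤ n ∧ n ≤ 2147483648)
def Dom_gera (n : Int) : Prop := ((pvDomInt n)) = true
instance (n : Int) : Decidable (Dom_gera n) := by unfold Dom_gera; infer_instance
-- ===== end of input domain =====

-- B builds only the top half of the matrix, each row by concatenating runs of 3s with the
-- two marks, and obtains the bottom half by mirror symmetry (objective: alternative).

-- ===== PORT A =====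
-- Python 'm[i][j] = v' for the nonnegative in-range indices A uses (exact there).
def setCell (m : List (List Int)) (i j : Int) (v : Int) : List (List Int) :=
  m.set i.toNat ((m.getD i.toNat []).set j.toNat v)

def gera (n : Int) : List (List Int) :=
  -- m = [[3]*n for _ in range(n)]
  let m0 := (PySem.List.pyRange 0 n 1).map (fun _ => PySem.List.pyRepeat [3] n)
  -- for i in range(n): m[i][i] = 1
  let m1 := (PySem.List.pyRange 0 n 1).foldl (fun m i => setCell m i i 1) m0
  -- a = n; for i in range(a): m[a-1][i] = 2; a -= 1
  let p := (PySem.List.pyRange 0 n 1).foldl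
    (fun (s : List (List Int) × Int) i => (setCell s.1 (s.2 - 1) i 2, s.2 - 1)) (m1, n)
  p.1

-- ===== PORT B =====
def gera_alt (n : Int) : List (List Int) :=
  -- top = rows 0 .. (n+1)//2 - 1, built as runs of 3s around the two marks
  let top := (PySem.List.pyRange 0 (PySem.Int.floordiv (n + 1) 2) 1).map (fun i =>
    let j := n - 1 - i
    if i = j then
      PySem.List.pyRepeat [3] i ++ [2] ++ PySem.List.pyRepeat [3] i
    else
      PySem.List.pyRepeat [3] i ++ [1] ++ PySem.List.pyRepeat [3] (j - i - 1)
        ++ [2] ++ PySem.List.pyRepeat [3] i)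
  -- bottom = [row[::-1] for row in top[:n//2]]; bottom.reverse()
  let bottom := (PySem.List.slice top none (some (PySem.Int.floordiv n 2))).map
    (fun row => (PySem.List.slice? row none none (-1)).getD [])
  let bottom := bottom.reverse
  top ++ bottom

-- ===== PRECONDITION & SPEC =====
def Spec_gera (n : Int) (out : List (List Int)) : Prop := out = gera_alt n
instance (n : Int) (out : List (List Int)) : Decidable (Spec_gera n out) := by unfold Spec_gera; infer_instance

-- ===== CLAIM (what is proved, stated in full; the proofs are below) =====
def Claim_equal_gera : Prop := ∀ (n : Int), Dom_gera n → Spec_gera n (gera n)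

-- ===== LEMMAS AND PROOFS =====

-- the final value of row r in the n×n result (k = n.toNat)
def rowM (k r : Nat) : List Int :=
  (List.range k).map (fun c => if c = k - 1 - r then 2 else if c = r then 1 else 3)

-- row after loop 1 / after loop 2 of A, for row index r (k = n.toNat)
def row1 (k r : Nat) : List Int := (List.replicate k 3).set r 1
def row2 (k r : Nat) : List Int := (row1 k r).set (k - 1 - r) 2

theorem getD_map_range' {α : Type} (f : Nat → List α) (k j : Nat) (h : j < k) :
    ((List.range k).map f).getD j [] = f j := by
  simp [List.getD_eq_getElem?_getD, List.getElem?_map, List.getElem?_range h]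

theorem set_map_range {α : Type} (f : Nat → α) (k j : Nat) (v : α) :
    ((List.range k).map f).set j v
      = (List.range k).map (fun r => if r = j then v else f r) := by
  apply List.ext_getElem
  · simp
  · intro i h1 h2
    rw [List.getElem_set]
    simp only [List.getElem_map, List.getElem_range]
    by_cases h : j = i
    · subst h; simp
    · rw [if_neg h, if_neg (fun hc => h hc.symm)]

theorem map_range_congr {α : Type} (f g : Nat → α) (k : Nat)
    (h : ∀ r < k, f r = g r) :
    (List.range k).map f = (List.range k).map g := by
  apply List.map_congr_left
  intro r hr
  exact h r (List.mem_range.mp hr)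

-- loop 1 invariant
theorem loop1_inv (k : Nat) (j : Nat) (hj : j ≤ k) :
    ((List.range j).map (fun x : Nat => (x : Int))).foldl (fun m i => setCell m i i 1)
        ((List.range k).map (fun _ => List.replicate k (3 : Int)))
      = (List.range k).map (fun r => if r < j then row1 k r else List.replicate k 3) := by
  induction j with
  | zero => simp
  | succ j ih =>
    rw [List.range_succ, List.map_append, List.foldl_append, ih (by omega)]
    simp only [List.map_cons, List.map_nil, List.foldl_cons, List.foldl_nil]
    simp only [setCell, Int.toNat_natCast]
    rw [getD_map_range' _ k j (by omega), if_neg (by omega), set_map_range]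
    apply map_range_congr
    intro r hr
    by_cases h : r = j
    · rw [if_pos h, if_pos (by omega), h]; rfl
    · rw [if_neg h]
      by_cases h2 : r < j
      · rw [if_pos h2, if_pos (by omega)]
      · rw [if_neg h2, if_neg (by omega)]

-- loop 2 invariant (state = (matrix, a) with a = n - j after j iterations)
theorem loop2_inv (k : Nat) (j : Nat) (hj : j ≤ k) :
    ((List.range j).map (fun x : Nat => (x : Int))).foldl
        (fun (s : List (List Int) × Int) i => (setCell s.1 (s.2 - 1) i 2, s.2 - 1))
        ((List.range k).map (fun r => row1 k r), (k : Int))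
      = ((List.range k).map (fun r => if k - j ≤ r then row2 k r else row1 k r),
          (k : Int) - j) := by
  induction j with
  | zero =>
    refine Prod.ext ?_ (by simp)
    simp only [List.range_zero, List.map_nil, List.foldl_nil]
    exact (map_range_congr _ _ k (fun r hr => by rw [if_neg (by omega)])).symm
  | succ j ih =>
    rw [List.range_succ, List.map_append, List.foldl_append, ih (by omega)]
    simp only [List.map_cons, List.map_nil, List.foldl_cons, List.foldl_nil]
    have hidx : ((k : Int) - j - 1).toNat = k - j - 1 := by omega
    refine Prod.ext ?_ (by push_cast; ring)
    simp only [setCell, hidx, Int.toNat_natCast]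
    rw [getD_map_range' _ k (k - j - 1) (by omega), if_neg (by omega), set_map_range]
    apply map_range_congr
    intro r hr
    by_cases h : r = k - j - 1
    · rw [if_pos h, if_pos (by omega), h, row2, show k - 1 - (k - j - 1) = j from by omega]
    · rw [if_neg h]
      by_cases h2 : k - j ≤ r
      · rw [if_pos h2, if_pos (by omega)]
      · rw [if_neg h2, if_neg (by omega)]

theorem row2_eq_rowM (k : Nat) (r : Nat) (hr : r < k) :
    row2 k r = rowM k r := by
  apply List.ext_getElem
  · simp [row2, row1, rowM]
  · intro c h1 h2
    have hc : c < k := by simpa [row2, row1] using h1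
    simp only [row2, row1, rowM, List.getElem_set, List.getElem_replicate,
      List.getElem_map, List.getElem_range]
    split_ifs <;> omega

-- A's result is the rowM matrix
theorem gera_eq_rowM (k : Nat) :
    gera (k : Int) = (List.range k).map (rowM k) := by
  unfold gera
  rw [PySem.List.pyRange_one]
  simp only [Int.sub_zero, zero_add, Int.toNat_natCast,
    PySem.List.pyRepeat_singleton, List.foldl_map, List.map_map, Function.comp_def]
  have e1 : (List.range k).foldl
      (fun m (i : Nat) => setCell m (i : Int) (i : Int) 1)
      ((List.range k).map (fun _ => List.replicate k (3 : Int)))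
      = (List.range k).map (fun r => row1 k r) := by
    have := loop1_inv k k le_rfl
    rw [List.foldl_map] at this
    rw [this]
    exact map_range_congr _ _ k (fun r hr => by rw [if_pos hr])
  rw [e1]
  have e2 := loop2_inv k k le_rfl
  rw [List.foldl_map] at e2
  rw [e2]
  apply map_range_congr
  intro r hr
  rw [if_pos (by omega), row2_eq_rowM k r hr]

-- B's run-built top-half row equals the final row
theorem rowB_eq_rowM (k x : Nat) (hx : x < (k + 1) / 2) :
    (if (x : Int) = (k : Int) - 1 - x then
        List.replicate x (3 : Int) ++ [2] ++ List.replicate x 3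
      else
        List.replicate x (3 : Int) ++ [1]
          ++ List.replicate ((k : Int) - 1 - x - x - 1).toNat 3 ++ [2] ++ List.replicate x 3)
      = rowM k x := by
  by_cases h : (x : Int) = (k : Int) - 1 - x
  · rw [if_pos h]
    apply List.ext_getElem
    · simp [rowM]; omega
    · intro c h1 h2
      have hc : c < k := by simpa [rowM] using h2
      simp only [rowM, List.getElem_append, List.getElem_replicate,
        List.getElem_map, List.getElem_range, List.length_append, List.length_replicate,
        List.length_cons, List.length_nil]
      split_ifs <;> simp_all <;> omega
  · rw [if_neg h]
    apply List.ext_getElem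
    · simp [rowM]; omega
    · intro c h1 h2
      have hc : c < k := by simpa [rowM] using h2
      simp only [rowM, List.getElem_append, List.getElem_replicate,
        List.getElem_map, List.getElem_range, List.length_append, List.length_replicate,
        List.length_cons, List.length_nil]
      split_ifs <;> simp_all <;> omega

-- reversing a row of the matrix mirrors its row index
theorem map_range_reverse {α : Type} (g : Nat → α) (b : Nat) :
    ((List.range b).map g).reverse = (List.range b).map (fun s => g (b - 1 - s)) := by
  apply List.ext_getElem
  · simp
  · intro i h1 h2
    simp [List.getElem_reverse]

theorem rowM_reverse (k r : Nat) (hr : r < k) :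
    (rowM k r).reverse = rowM k (k - 1 - r) := by
  unfold rowM
  rw [map_range_reverse]
  apply map_range_congr
  intro c hc
  split_ifs <;> omega

theorem gera_eq_alt (n : Int) : gera n = gera_alt n := by
  by_cases hn : n ≤ 0
  · have e1 : PySem.List.pyRange 0 n 1 = [] := PySem.List.pyRange_one_eq_nil (by omega)
    have e2 : PySem.List.pyRange 0 ((n + 1) / 2) 1 = [] :=
      PySem.List.pyRange_one_eq_nil (by omega)
    simp [gera, gera_alt, e1, e2, PySem.List.slice]
  · obtain ⟨k, rfl⟩ : ∃ k : Nat, n = (k : Int) :=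
      ⟨n.toNat, (Int.toNat_of_nonneg (by omega)).symm⟩
    rw [gera_eq_rowM]
    unfold gera_alt
    have ht : PySem.Int.floordiv ((k : Int) + 1) 2 = (((k + 1) / 2 : Nat) : Int) := by
      rw [show ((k : Int) + 1) = (((k + 1 : Nat) : Int)) by push_cast; ring]
      exact_mod_cast PySem.Int.floordiv_natCast (k + 1) 2
    have hb : PySem.Int.floordiv (k : Int) 2 = (((k / 2 : Nat) : Int)) := by
      exact_mod_cast PySem.Int.floordiv_natCast k 2
    rw [ht, hb, PySem.List.pyRange_one]
    set t := (k + 1) / 2 with htdef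
    set b := k / 2 with hbdef
    simp only [Int.sub_zero, Int.toNat_natCast, zero_add,
      PySem.List.pyRepeat_singleton, List.map_map, Function.comp_def]
    -- identify top
    have htop : (List.range t).map (fun x : Nat =>
        if (x : Int) = (k : Int) - 1 - x then
          List.replicate x (3 : Int) ++ [2] ++ List.replicate x 3
        else
          List.replicate x (3 : Int) ++ [1]
            ++ List.replicate ((k : Int) - 1 - x - x - 1).toNat 3 ++ [2]
            ++ List.replicate x 3)
        = (List.range t).map (rowM k) := by
      apply map_range_congr
      intro x hx
      exact rowB_eq_rowM k x (by omega)
    rw [htop]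
    rw [PySem.List.slice_to_natCast, ← List.map_take, List.take_range, Nat.min_eq_left (by omega : b ≤ t)]
    have hrev : ∀ row ∈ (List.range b).map (rowM k),
        (PySem.List.slice? row none none (-1)).getD [] = row.reverse := by
      intro row _
      rw [PySem.List.slice?_none_none_neg_one]
      rfl
    rw [List.map_congr_left hrev, List.map_map]
    have hmir : (List.range b).map (List.reverse ∘ rowM k)
        = (List.range b).map (fun s => rowM k (k - 1 - s)) := by
      apply map_range_congr
      intro s hs
      exact rowM_reverse k s (by omega)
    rw [hmir, map_range_reverse]
    have hshift : (List.range b).map (fun s => rowM k (k - 1 - (b - 1 - s)))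
        = (List.range b).map (fun s => rowM k (t + s)) := by
      apply map_range_congr
      intro s hs
      congr 1
      omega
    rw [hshift]
    rw [show List.range k = List.range t ++ (List.range b).map (fun s => t + s) from by
      rw [show k = t + b from by omega, List.range_add]]
    rw [List.map_append, List.map_map]
    rfl

-- ===== VERDICT (by name: the statement is the Claim_ definition above) =====
theorem gera_spec : Claim_equal_gera := by
  intro n _
  exact gera_eq_alt n
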